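-- pv_equiv track=rewrite | github.com/ruicore/algorithm | LeetCode/2019-10-04-410-Split-Array-Largest-Sum.py | is_greater
-- ===== SOURCE A (Python) =====
-- from bisect import bisect_right
--
-- def is_greater(prefix_sum, max_num, m, count):
--
--     pivot, start, group = max_num, 0, 0
--     while start < count:
--         start = bisect_right(prefix_sum, pivot, start)
--         pivot = prefix_sum[start - 1] + max_num
--         group += 1
--         if group > m:
--             return True
--
--     return False
-- ===== SOURCE B (Python) =====
-- def is_greater(prefix_sum, max_num, m, count):
--     # One flat forward pass over the prefix sums: keep the prefix-sum `base` at which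
--     # the current group started (first group's base is 0) and count groups greedily.
--     if count > len(prefix_sum):
--         return True  # more prefix sums demanded than exist: no split can cover them
--     groups, base = 1, 0
--     for i in range(count):
--         v = prefix_sum[i]
--         if v - base > max_num:
--             if i == 0 or v - prefix_sum[i - 1] > max_num:
--                 return True  # a single element already exceeds max_num: no split can work
--             base = prefix_sum[i - 1]
--             groups += 1
--     return count > 0 and groups > m
-- ===== Notes on version B (the rewrite author's own statement) =====
-- stated objective: simpler
-- what changed: Replaces A's while-loop of repeated bisect_right binary searches (jumping from group boundary to group boundary, with a negative-index look-back) by one flat forward scan that keeps the running group's base prefix sum and a group counter.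
-- intended difference: On sorted inputs whose first prefix sum exceeds max_num (so the first element alone cannot fit in any group), with m >= 2 and all count scanned prefix sums <= prefix_sum[-1] + max_num, A's negative-index wraparound prefix_sum[-1] makes the wraparound pivot swallow the whole scanned range and A returns False, while B returns True, the intended answer. — e.g. on is_greater([5], 3, 2, 1): A returns false, B returns true
-- outside the precondition, e.g. on is_greater([3, 1, 2], 2, 1, 3): A returns False, B returns True; on is_greater([2, 1], 1, 1, 2): A returns False, B returns True
import Mathlib
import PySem

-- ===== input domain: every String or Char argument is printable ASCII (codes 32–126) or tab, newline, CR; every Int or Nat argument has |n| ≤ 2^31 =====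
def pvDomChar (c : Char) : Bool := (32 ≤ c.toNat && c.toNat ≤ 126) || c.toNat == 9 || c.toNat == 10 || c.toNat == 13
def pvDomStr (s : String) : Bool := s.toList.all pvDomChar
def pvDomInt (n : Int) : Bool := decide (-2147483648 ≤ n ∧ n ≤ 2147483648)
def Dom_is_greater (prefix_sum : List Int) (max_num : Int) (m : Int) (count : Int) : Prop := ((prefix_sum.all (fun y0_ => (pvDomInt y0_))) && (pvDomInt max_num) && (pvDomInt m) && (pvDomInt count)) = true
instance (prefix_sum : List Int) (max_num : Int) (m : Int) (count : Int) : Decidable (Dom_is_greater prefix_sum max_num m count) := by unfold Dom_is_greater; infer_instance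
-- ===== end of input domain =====

-- B replaces A's repeated bisect_right jumps by one flat forward scan (objective: simpler);
-- on sorted inputs with prefix_sum[0] > max_num and m ≥ 2 whose scanned prefix sums all fit
-- under prefix_sum[-1] + max_num the values differ intentionally (see D_is_greater).

-- ===== PORT A =====
-- literal port of Python's bisect_right(a, x, lo, hi); the fuel (≥ hi - lo, which strictly
-- decreases) only makes the recursion structural, it never changes the computed value
def pvBisectRight (a : List Int) (x : Int) : Nat → Nat → Nat → Nat
  | 0, lo, _ => lo
  | fuel + 1, lo, hi =>
    if lo < hi then
      if x < a.getD ((lo + hi) / 2) 0 then pvBisectRight a x fuel lo ((lo + hi) / 2)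
      else pvBisectRight a x fuel ((lo + hi) / 2 + 1) hi
    else lo

-- A's while loop; it terminates because `group` strictly increases and the loop returns once
-- group > m, so fuel (m+1).toNat + 1 is never exhausted.
-- prefix_sum[start - 1]: pyGet? is none (Python IndexError) only for prefix_sum = [] with count > 0 — excluded by Pre_.
def pvLoopA (ps : List Int) (mx m count : Int) : Nat → Int → Nat → Int → Bool
  | 0, _, _, _ => false
  | fuel + 1, pivot, start, group =>
    if (start : Int) < count then
      let s := pvBisectRight ps pivot ps.length start ps.length
      let p := (PySem.List.pyGet? ps ((s : Int) - 1)).getD 0 + mx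
      if group + 1 > m then true
      else pvLoopA ps mx m count fuel p s (group + 1)
    else false

def is_greater (prefix_sum : List Int) (max_num : Int) (m : Int) (count : Int) : Bool :=
  pvLoopA prefix_sum max_num m count ((m + 1).toNat + 1) max_num 0 0

-- ===== PORT B =====
-- B's single forward scan over range(count): state (groups, base); `i = 0 ∨ …` is Python's
-- short-circuit `or`; fuel = number of remaining indices (never exhausted while i < n).
def pvLoopB (ps : List Int) (mx m : Int) (n : Nat) : Nat → Nat → Int → Int → Bool
  | 0, _, groups, _ => decide (0 < n ∧ m < groups)
  | fuel + 1, i, groups, base =>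
    if i < n then
      let v := ps.getD i 0
      if v - base > mx then
        if i = 0 ∨ v - ps.getD (i - 1) 0 > mx then true
        else pvLoopB ps mx m n fuel (i + 1) (groups + 1) (ps.getD (i - 1) 0)
      else pvLoopB ps mx m n fuel (i + 1) groups base
    else decide (0 < n ∧ m < groups)

def is_greater_alt (prefix_sum : List Int) (max_num : Int) (m : Int) (count : Int) : Bool :=
  if (prefix_sum.length : Int) < count then true
  else pvLoopB prefix_sum max_num m count.toNat count.toNat 0 1 0

-- ===== PRECONDITION & SPEC =====
-- Pre_ excludes exactly two kinds of input: the empty list with count ≥ 1, on which A raises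
-- IndexError (prefix_sum[-1] on []), and UNSORTED prefix_sum with 1 ≤ count ≤ len on which the
-- answer could still depend on element order — bisect_right's sortedness precondition is
-- violated there and its result is a meaningless binary-search position, so A's value is an
-- accident of the search path (see the cites).  Everything else is admitted: count ≤ 0 (the
-- loop never runs), m ≤ 0 with a non-empty scan (both True), lists all of whose prefix sums
-- are ≤ max_num (one group, even unsorted: the search never descends left), sorted lists with
-- 1 ≤ count ≤ len, and count > len over a non-empty list (both True).
def Pre_is_greater (prefix_sum : List Int) (max_num : Int) (m : Int) (count : Int) : Prop :=
  count ≤ 0 ∨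
  (m ≤ 0 ∧ 1 ≤ count ∧ count ≤ (prefix_sum.length : Int)) ∨
  ((∀ v ∈ prefix_sum, v ≤ max_num) ∧ 1 ≤ count ∧ count ≤ (prefix_sum.length : Int)) ∨
  (List.Pairwise (· ≤ ·) prefix_sum ∧ 1 ≤ count ∧ count ≤ (prefix_sum.length : Int)) ∨
  ((prefix_sum.length : Int) < count ∧ 1 ≤ prefix_sum.length)
instance (prefix_sum : List Int) (max_num : Int) (m : Int) (count : Int) : Decidable (Pre_is_greater prefix_sum max_num m count) := by unfold Pre_is_greater; infer_instance
def pvWitness_is_greater : List Int × Int × Int × Int := ([1, 3, 6], 3, 2, 3)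

-- On sorted inputs whose first prefix sum exceeds max_num (the first element alone cannot fit
-- in any group of sum ≤ max_num), with m ≥ 2 and all count scanned prefix sums ≤
-- prefix_sum[-1] + max_num, A's negative-index wraparound prefix_sum[-1] makes the wraparound
-- pivot swallow the whole scanned range and A returns False, while B returns True — the
-- intended answer.
def D_is_greater (prefix_sum : List Int) (max_num : Int) (m : Int) (count : Int) : Prop :=
  prefix_sum ≠ [] ∧ max_num < prefix_sum.getD 0 0 ∧ 2 ≤ m ∧ 1 ≤ count ∧
  count ≤ (prefix_sum.length : Int) ∧
  prefix_sum.getD (count.toNat - 1) 0 ≤ prefix_sum.getD (prefix_sum.length - 1) 0 + max_num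
instance (prefix_sum : List Int) (max_num : Int) (m : Int) (count : Int) : Decidable (D_is_greater prefix_sum max_num m count) := by unfold D_is_greater; infer_instance

def Spec_is_greater (prefix_sum : List Int) (max_num : Int) (m : Int) (count : Int) (out : Bool) : Prop := ¬ D_is_greater prefix_sum max_num m count → out = is_greater_alt prefix_sum max_num m count
instance (prefix_sum : List Int) (max_num : Int) (m : Int) (count : Int) (out : Bool) : Decidable (Spec_is_greater prefix_sum max_num m count out) := by unfold Spec_is_greater; infer_instance

def pvDiffWitness_is_greater : List Int × Int × Int × Int := ([5], 3, 2, 1)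
def pvDiffWitnessOut_is_greater : Bool × Bool := (false, true)

-- ===== CLAIM (what is proved, stated in full; the proofs are below) =====
def Claim_unchanged_is_greater : Prop := ∀ (prefix_sum : List Int) (max_num : Int) (m : Int) (count : Int), Dom_is_greater prefix_sum max_num m count → Pre_is_greater prefix_sum max_num m count → Spec_is_greater prefix_sum max_num m count (is_greater prefix_sum max_num m count)
def Claim_changed_is_greater : Prop := Dom_is_greater (pvDiffWitness_is_greater.1) (pvDiffWitness_is_greater.2.1) (pvDiffWitness_is_greater.2.2.1) (pvDiffWitness_is_greater.2.2.2) ∧ Pre_is_greater (pvDiffWitness_is_greater.1) (pvDiffWitness_is_greater.2.1) (pvDiffWitness_is_greater.2.2.1) (pvDiffWitness_is_greater.2.2.2) ∧ D_is_greater (pvDiffWitness_is_greater.1) (pvDiffWitness_is_greater.2.1) (pvDiffWitness_is_greater.2.2.1) (pvDiffWitness_is_greater.2.2.2) ∧ is_greater (pvDiffWitness_is_greater.1) (pvDiffWitness_is_greater.2.1) (pvDiffWitness_is_greater.2.2.1) (pvDiffWitness_is_greater.2.2.2) = pvDiffWitnessOut_is_greater.1 ∧ is_greater_alt (pvDiffWitness_is_greater.1)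 (pvDiffWitness_is_greater.2.1) (pvDiffWitness_is_greater.2.2.1) (pvDiffWitness_is_greater.2.2.2) = pvDiffWitnessOut_is_greater.2 ∧ pvDiffWitnessOut_is_greater.1 ≠ pvDiffWitnessOut_is_greater.2
def Claim_exact_is_greater : Prop := ∀ (prefix_sum : List Int) (max_num : Int) (m : Int) (count : Int), Dom_is_greater prefix_sum max_num m count → Pre_is_greater prefix_sum max_num m count → D_is_greater prefix_sum max_num m count → is_greater prefix_sum max_num m count ≠ is_greater_alt prefix_sum max_num m count

-- ===== LEMMAS AND PROOFS =====

-- sorted lists: getD is monotone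
theorem pv_sorted_getD {ps : List Int} (hs : List.Pairwise (· ≤ ·) ps) {i j : Nat}
    (hij : i ≤ j) (hj : j < ps.length) : ps.getD i 0 ≤ ps.getD j 0 := by
  rcases Nat.eq_or_lt_of_le hij with rfl | hij
  · exact le_refl _
  · have hi : i < ps.length := lt_trans hij hj
    rw [List.getD_eq_getElem _ _ hi, List.getD_eq_getElem _ _ hj]
    exact List.pairwise_iff_getElem.mp hs i j hi hj hij

-- specification of pvBisectRight on a sorted list
theorem pv_bisect_spec (ps : List Int) (hs : List.Pairwise (· ≤ ·) ps) (x : Int) :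
    ∀ (fuel lo hi : Nat), hi - lo ≤ fuel → lo ≤ hi → hi ≤ ps.length →
    lo ≤ pvBisectRight ps x fuel lo hi ∧ pvBisectRight ps x fuel lo hi ≤ hi ∧
    (∀ t, lo ≤ t → t < pvBisectRight ps x fuel lo hi → ps.getD t 0 ≤ x) ∧
    (pvBisectRight ps x fuel lo hi < hi → x < ps.getD (pvBisectRight ps x fuel lo hi) 0) := by
  intro fuel
  induction fuel with
  | zero =>
    intro lo hi hf hlo _
    have : hi = lo := by omega
    subst this
    simp [pvBisectRight]
    omega
  | succ fuel ih =>
    intro lo hi hf hlo hhi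
    by_cases h : lo < hi
    · have hmid : (lo + hi) / 2 < hi := by omega
      have hmidlo : lo ≤ (lo + hi) / 2 := by omega
      by_cases hx : x < ps.getD ((lo + hi) / 2) 0
      · have hrec := ih lo ((lo + hi) / 2) (by omega) hmidlo (le_trans (le_of_lt hmid) hhi)
        simp only [pvBisectRight, if_pos h, if_pos hx]
        refine ⟨hrec.1, by omega, hrec.2.2.1, ?_⟩
        intro hlt
        by_cases hend : pvBisectRight ps x fuel lo ((lo + hi) / 2) < (lo + hi) / 2
        · exact hrec.2.2.2 hend
        · have he : pvBisectRight ps x fuel lo ((lo + hi) / 2) = (lo + hi) / 2 := by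
            have := hrec.2.1; omega
          rw [he]; exact hx
      · have hrec := ih ((lo + hi) / 2 + 1) hi (by omega) (by omega) hhi
        simp only [pvBisectRight, if_pos h, if_neg hx]
        refine ⟨by omega, hrec.2.1, ?_, hrec.2.2.2⟩
        intro t hlo' hlt
        by_cases ht : t ≤ (lo + hi) / 2
        · calc ps.getD t 0 ≤ ps.getD ((lo + hi) / 2) 0 :=
                pv_sorted_getD hs ht (lt_of_lt_of_le hmid hhi)
            _ ≤ x := not_lt.mp hx
        · exact hrec.2.2.1 t (by omega) hlt
    · have : hi = lo := by omega
      subst this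
      simp [pvBisectRight]
      omega

-- index (s : Int) - 1 for s ≥ 1 is the ordinary element s - 1
theorem pv_pyget_pos (ps : List Int) (s : Nat) (h1 : 1 ≤ s) (h2 : s ≤ ps.length) :
    (PySem.List.pyGet? ps ((s : Int) - 1)).getD 0 = ps.getD (s - 1) 0 := by
  have : ((s : Int) - 1) = ((s - 1 : Nat) : Int) := by omega
  rw [this, PySem.List.pyGet?_natCast]
  rw [List.getElem?_eq_getElem (by omega), List.getD_eq_getElem _ _ (by omega)]
  rfl

-- index -1 is the last element
theorem pv_pyget_neg_one (ps : List Int) (h : 0 < ps.length) :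
    (PySem.List.pyGet? ps ((0 : Int) - 1)).getD 0 = ps.getD (ps.length - 1) 0 := by
  have : ((0 : Int) - 1) = (-1 : Int) := by ring
  rw [this, PySem.List.pyGet?_neg_one, List.getLast?_eq_getElem?]
  rw [List.getElem?_eq_getElem (by omega), List.getD_eq_getElem _ _ (by omega)]
  rfl

-- A stalls: when bisect_right returns `start` again and pivot = prefix_sum[start-1] + max_num,
-- the state repeats with group + 1 and A eventually returns True.
theorem pv_stall (ps : List Int) (mx m count pivot : Int) (start : Nat)
    (hcount : (start : Int) < count)
    (hb : pvBisectRight ps pivot ps.length start ps.length = start)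
    (hp : pivot = (PySem.List.pyGet? ps ((start : Int) - 1)).getD 0 + mx) :
    ∀ (fuel : Nat) (group : Int), (m - group).toNat < fuel →
    pvLoopA ps mx m count fuel pivot start group = true := by
  intro fuel
  induction fuel with
  | zero => intro group h; omega
  | succ fuel ih =>
    intro group hfuel
    simp only [pvLoopA, if_pos hcount, hb, ← hp]
    by_cases hg : group + 1 > m
    · simp [hg]
    · rw [if_neg hg]
      exact ih (group + 1) (by omega)

-- B exits with its final test as soon as i ≥ n, whatever the fuel
theorem pv_B_exit (ps : List Int) (mx m : Int) (n : Nat) :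
    ∀ (fuel i : Nat) (groups base : Int), n ≤ i →
    pvLoopB ps mx m n fuel i groups base = decide (0 < n ∧ m < groups) := by
  intro fuel i groups base h
  cases fuel with
  | zero => rfl
  | succ fuel => simp only [pvLoopB, if_neg (by omega : ¬ i < n)]

-- B returns True once its group counter exceeds m (the counter never decreases)
theorem pv_B_ge (ps : List Int) (mx m : Int) (n : Nat) (hn : 0 < n) :
    ∀ (fuel i : Nat) (groups base : Int), m < groups →
    pvLoopB ps mx m n fuel i groups base = true := by
  intro fuel
  induction fuel with
  | zero => intro i groups base hg; simp [pvLoopB, hn, hg]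
  | succ fuel ih =>
    intro i groups base hg
    by_cases hi : i < n
    · simp only [pvLoopB, if_pos hi]
      split_ifs with h1 h2
      · rfl
      · exact ih _ _ _ (by omega)
      · exact ih _ _ _ hg
    · rw [pv_B_exit ps mx m n _ i groups base (by omega)]
      simp [hn, hg]

-- B walks through indices whose prefix sum stays within base + mx without changing state
theorem pv_walk (ps : List Int) (mx m : Int) (n : Nat) :
    ∀ (k fuel i j : Nat) (groups base : Int), j - i = k → i ≤ j → j ≤ n → n - i ≤ fuel →
    (∀ t, i ≤ t → t < j → ps.getD t 0 ≤ base + mx) →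
    pvLoopB ps mx m n fuel i groups base = pvLoopB ps mx m n (fuel - k) j groups base := by
  intro k
  induction k with
  | zero =>
    intro fuel i j groups base hk hij _ _ _
    have : j = i := by omega
    subst this; simp
  | succ k ih =>
    intro fuel i j groups base hk hij hjn hfuel hel
    have hin : i < n := by omega
    have hfuel1 : 1 ≤ fuel := by omega
    obtain ⟨fuel', rfl⟩ : ∃ f, fuel = f + 1 := ⟨fuel - 1, by omega⟩
    have hv : ¬ (ps.getD i 0 - base > mx) := by
      have := hel i (le_refl _) (by omega); omega
    simp only [pvLoopB, if_pos hin, if_neg hv]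
    rw [ih fuel' (i + 1) j groups base (by omega) (by omega) hjn (by omega)
      (fun t ht1 ht2 => hel t (by omega) ht2)]
    congr 1
    omega

-- one-step rewrite lemmas for the two loops
theorem pvLoopA_cont (ps : List Int) (mx m count : Int) (fuel : Nat) (pivot : Int)
    (start : Nat) (group : Int) (h : (start : Int) < count) (hg : ¬ group + 1 > m) :
    pvLoopA ps mx m count (fuel + 1) pivot start group =
    pvLoopA ps mx m count fuel
      ((PySem.List.pyGet? ps (((pvBisectRight ps pivot ps.length start ps.length : Nat) : Int) - 1)).getD 0 + mx)
      (pvBisectRight ps pivot ps.length start ps.length) (group + 1) := by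
  simp only [pvLoopA, if_pos h, if_neg hg]

theorem pvLoopA_true (ps : List Int) (mx m count : Int) (fuel : Nat) (pivot : Int)
    (start : Nat) (group : Int) (h : (start : Int) < count) (hg : group + 1 > m) :
    pvLoopA ps mx m count (fuel + 1) pivot start group = true := by
  simp only [pvLoopA, if_pos h, if_pos hg]

theorem pvLoopA_exit (ps : List Int) (mx m count : Int) (pivot : Int)
    (start : Nat) (group : Int) (h : ¬ (start : Int) < count) :
    ∀ fuel, pvLoopA ps mx m count fuel pivot start group = false := by
  intro fuel
  cases fuel with
  | zero => rfl
  | succ fuel => simp only [pvLoopA, if_neg h]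

theorem pvLoopB_true (ps : List Int) (mx m : Int) (n fuel i : Nat) (groups base : Int)
    (hi : i < n) (hb : ps.getD i 0 - base > mx)
    (ho : i = 0 ∨ ps.getD i 0 - ps.getD (i - 1) 0 > mx) :
    pvLoopB ps mx m n (fuel + 1) i groups base = true := by
  simp only [pvLoopB, if_pos hi, if_pos hb, if_pos ho]


-- main loop correspondence: A at the head of an iteration with a fresh-group start s
-- equals B entering index s with the matching state
theorem pv_main (ps : List Int) (mx m : Int) (n : Nat) (hn : n ≤ ps.length)
    (hs : List.Pairwise (· ≤ ·) ps) :
    ∀ (k : Nat) (g : Int) (s : Nat) (base : Int) (fuelA fuelB : Nat), (m - g).toNat = k →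
    1 ≤ s → s < n → g ≤ m → base + mx < ps.getD s 0 →
    (m - g).toNat < fuelA → n - s ≤ fuelB →
    pvLoopA ps mx m (n : Int) fuelA (ps.getD (s - 1) 0 + mx) s g =
    pvLoopB ps mx m n fuelB s g base := by
  intro k
  induction k using Nat.strong_induction_on with
  | _ k ihk =>
  intro g s base fuelA fuelB hk hs1 hsn hgm hbase hfA hfB
  obtain ⟨fA, rfl⟩ : ∃ f, fuelA = f + 1 := ⟨fuelA - 1, by omega⟩
  obtain ⟨fB, rfl⟩ : ∃ f, fuelB = f + 1 := ⟨fuelB - 1, by omega⟩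
  have hlen : n ≤ ps.length := hn
  have hsc : ((s : Nat) : Int) < (n : Int) := by exact_mod_cast hsn
  -- bisect on A's side
  set pivot := ps.getD (s - 1) 0 + mx with hpivot
  have hspec := pv_bisect_spec ps hs pivot ps.length s ps.length (by omega)
    (by omega) (le_refl _)
  set r := pvBisectRight ps pivot ps.length s ps.length with hr
  -- B's side takes the boundary branch at i = s
  have hvb : ps.getD s 0 - base > mx := by omega
  have hs0 : ¬ (s = 0) := by omega
  by_cases hov : ps.getD s 0 - ps.getD (s - 1) 0 > mx
  -- oversize: B returns True, A stalls at s
  · have hrs : r = s := by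
      rcases Nat.eq_or_lt_of_le hspec.1 with h | h
      · omega
      · exfalso
        have := hspec.2.2.1 s (le_refl _) h
        omega
    have hpy : pivot = (PySem.List.pyGet? ps ((s : Int) - 1)).getD 0 + mx := by
      rw [pv_pyget_pos ps s hs1 (by omega)]
    simp only [pvLoopB, if_pos hsn, if_pos hvb]
    rw [if_pos (Or.inr hov)]
    simp only [pvLoopA, if_pos hsc, ← hr, hrs, ← hpy]
    by_cases hg : g + 1 > m
    · simp [hg]
    · rw [if_neg hg]
      exact pv_stall ps mx m (n : Int) pivot s hsc (hrs ▸ hr.symm) hpy fA (g + 1) (by omega)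
  -- no oversize: B starts the next group and walks to r; A jumps to r
  · have hrgt : s < r := by
      rcases Nat.eq_or_lt_of_le hspec.1 with h | h
      · exfalso
        have := hspec.2.2.2 (by omega : r < ps.length)
        rw [← h] at this
        omega
      · exact h
    have hpy : (PySem.List.pyGet? ps ((r : Int) - 1)).getD 0 = ps.getD (r - 1) 0 :=
      pv_pyget_pos ps r (by omega) (by omega)
    simp only [pvLoopA, if_pos hsc, ← hr, hpy]
    simp only [pvLoopB, if_pos hsn, if_pos hvb]
    have hor : ¬ (s = 0 ∨ ps.getD s 0 - ps.getD (s - 1) 0 > mx) := by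
      simp only [not_or]; exact ⟨hs0, hov⟩
    rw [if_neg hor]
    by_cases hg : g + 1 > m
    · rw [if_pos hg]
      exact (pv_B_ge ps mx m n (by omega) fB (s + 1) (g + 1) (ps.getD (s - 1) 0) (by omega)).symm
    · rw [if_neg hg]
      rcases lt_or_ge r n with hrlt | hreq
      · -- r < n: walk B to r, then apply the induction hypothesis at the next group head
        have hwalk := pv_walk ps mx m n (r - (s + 1)) fB (s + 1) r (g + 1) (ps.getD (s - 1) 0)
          rfl (by omega) (by omega) (by omega)
          (fun t ht1 ht2 => hspec.2.2.1 t (by omega) ht2)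
        rw [hwalk]
        have hpivr : pivot < ps.getD r 0 := hspec.2.2.2 (by omega)
        exact ihk (m - (g + 1)).toNat (by omega) (g + 1) r (ps.getD (s - 1) 0) fA
          (fB - (r - (s + 1))) rfl (by omega) hrlt (by omega) (by omega) (by omega) (by omega)
      · -- r ≥ n: A's loop condition fails, B walks off the end; both give the final test
        have hwalk := pv_walk ps mx m n (n - (s + 1)) fB (s + 1) n (g + 1) (ps.getD (s - 1) 0)
          rfl (by omega) (le_refl _) (by omega)
          (fun t ht1 ht2 => hspec.2.2.1 t (by omega) (by omega))
        rw [hwalk]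
        rw [pvLoopA_exit ps mx m (n : Int) _ r (g + 1) (by omega) fA]
        rw [pv_B_exit ps mx m n _ n (g + 1) _ (le_refl _)]
        have hno : ¬ (0 < n ∧ m < g + 1) := fun h => by omega
        rw [decide_eq_false hno]

-- when every element is ≤ x, binary search never descends left and returns hi
theorem pv_bisect_all (ps : List Int) (x : Int) (hall : ∀ v ∈ ps, v ≤ x) :
    ∀ (fuel lo hi : Nat), hi - lo ≤ fuel → lo ≤ hi → hi ≤ ps.length →
    pvBisectRight ps x fuel lo hi = hi := by
  intro fuel
  induction fuel with
  | zero =>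
    intro lo hi hf hlo _
    have : hi = lo := by omega
    subst this
    simp [pvBisectRight]
  | succ fuel ih =>
    intro lo hi hf hlo hhi
    by_cases h : lo < hi
    · have hmem : ps.getD ((lo + hi) / 2) 0 ∈ ps := by
        rw [List.getD_eq_getElem _ _ (by omega)]
        exact List.getElem_mem _
      have hx : ¬ x < ps.getD ((lo + hi) / 2) 0 := not_lt.mpr (hall _ hmem)
      simp only [pvBisectRight, if_pos h, if_neg hx]
      exact ih ((lo + hi) / 2 + 1) hi (by omega) (by omega) hhi
    · have : hi = lo := by omega
      subst this
      simp [pvBisectRight]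

-- without any sortedness, binary search still never leaves [lo, hi]
theorem pv_bisect_le (a : List Int) (x : Int) :
    ∀ (fuel lo hi : Nat), lo ≤ hi → pvBisectRight a x fuel lo hi ≤ hi := by
  intro fuel
  induction fuel with
  | zero => intro lo hi h; simpa [pvBisectRight]
  | succ fuel ih =>
    intro lo hi h
    by_cases hlh : lo < hi
    · by_cases hx : x < a.getD ((lo + hi) / 2) 0
      · simp only [pvBisectRight, if_pos hlh, if_pos hx]
        exact le_trans (ih lo ((lo + hi) / 2) (by omega)) (by omega)
      · simp only [pvBisectRight, if_pos hlh, if_neg hx]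
        exact ih ((lo + hi) / 2 + 1) hi (by omega)
    · simpa [pvBisectRight, hlh]

-- count > len over a non-empty list: A's start stays ≤ len < count forever, so its group
-- counter passes any m and it returns True
theorem pv_A_over (ps : List Int) (mx m count : Int)
    (hc : (ps.length : Int) < count) :
    ∀ (fuel : Nat) (pivot : Int) (start : Nat) (group : Int), start ≤ ps.length →
    (m - group).toNat < fuel → pvLoopA ps mx m count fuel pivot start group = true := by
  intro fuel
  induction fuel with
  | zero => intro pivot start group _ h; omega
  | succ fuel ih =>
    intro pivot start group hstart hfuel
    simp only [pvLoopA, if_pos (by omega : (start : Int) < count)]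
    by_cases hg : group + 1 > m
    · simp [hg]
    · rw [if_neg hg]
      exact ih _ _ _ (pv_bisect_le ps pivot ps.length start ps.length (by omega)) (by omega)

-- ===== VERDICT (by name: the statement is the Claim_ definition above) =====
theorem is_greater_spec : Claim_unchanged_is_greater := by
  intro ps mx m count _ hpre hnd
  rcases hpre with hc0 | ⟨hm0, hc1, hcl⟩ | ⟨hall, hc1, hcl⟩ | ⟨hs, hc1, hcl⟩ | ⟨hlc, hl1⟩
  · -- count ≤ 0: A's loop condition and B's range are empty, both give False
    unfold is_greater is_greater_alt
    rw [if_neg (by omega : ¬ (ps.length : Int) < count)]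
    rw [pvLoopA_exit ps mx m count mx 0 0 (by omega) _]
    rw [show count.toNat = 0 from by omega]
    rw [pv_B_exit ps mx m 0 0 0 1 0 (le_refl _)]
    rw [decide_eq_false (fun h => by omega)]
  · -- m ≤ 0 with a non-empty range: A returns True at its first group, so does B's final test
    unfold is_greater is_greater_alt
    rw [if_neg (by omega : ¬ (ps.length : Int) < count)]
    rw [pvLoopA_true ps mx m _ _ mx 0 0 (by omega) (by omega)]
    exact (pv_B_ge ps mx m _ (by omega) _ 0 1 0 (by omega)).symm
  · -- every prefix sum ≤ max_num: A's first bisect jumps to len and the loop ends with one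
    -- group; B never starts a second group
    set n := count.toNat with hnn
    have hcount : count = (n : Int) := by omega
    have hn1 : 1 ≤ n := by omega
    have hnl : n ≤ ps.length := by omega
    unfold is_greater is_greater_alt
    rw [if_neg (by omega : ¬ (ps.length : Int) < count)]
    rw [hcount, Int.toNat_natCast]
    have h0c : ((0 : Nat) : Int) < (n : Int) := by omega
    rcases lt_or_ge m 1 with hm | hm
    · rw [pvLoopA_true ps mx m _ _ mx 0 0 h0c (by omega)]
      exact (pv_B_ge ps mx m _ (by omega) _ 0 1 0 (by omega)).symm
    · rw [pvLoopA_cont ps mx m _ _ mx 0 0 h0c (by omega)]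
      rw [pv_bisect_all ps mx hall ps.length 0 ps.length (by omega) (by omega) (le_refl _)]
      rw [pvLoopA_exit ps mx m _ _ ps.length (0 + 1) (by omega) _]
      have hwalk := pv_walk ps mx m n n n 0 n 1 0 (by omega) (by omega) (le_refl _) (by omega)
        (fun t ht1 ht2 => by
          have hmem : ps.getD t 0 ∈ ps := by
            rw [List.getD_eq_getElem _ _ (by omega)]
            exact List.getElem_mem _
          have := hall _ hmem
          omega)
      rw [hwalk, pv_B_exit ps mx m n _ n 1 0 (le_refl _)]
      rw [decide_eq_false (fun h => by omega)]
  -- 1 ≤ count ≤ len, sorted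
  set n := count.toNat with hnn
  have hcount : count = (n : Int) := by omega
  have hn1 : 1 ≤ n := by omega
  have hnl : n ≤ ps.length := by omega
  have hn0 : 0 < ps.length := by omega
  unfold is_greater is_greater_alt
  rw [if_neg (by omega : ¬ (ps.length : Int) < count)]
  rw [hcount, Int.toNat_natCast]
  have h0c : ((0 : Nat) : Int) < (n : Int) := by omega
  rcases lt_or_ge m 1 with hm | hm
  · -- m ≤ 0: A returns True at its first group, B's final test can only be True
    rw [pvLoopA_true ps mx m _ _ mx 0 0 h0c (by omega)]
    exact (pv_B_ge ps mx m _ (by omega) _ 0 1 0 (by omega)).symm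
  -- m ≥ 1: A's first iteration continues
  have hspec1 := pv_bisect_spec ps hs mx ps.length 0 ps.length (by omega) (by omega) (le_refl _)
  set s1 := pvBisectRight ps mx ps.length 0 ps.length with hs1
  rw [pvLoopA_cont ps mx m _ _ mx 0 0 h0c (by omega), ← hs1]
  rcases lt_or_ge mx (ps.getD 0 0) with hx0 | hx0
  · -- prefix_sum[0] > max_num: B returns True at index 0; A too unless D_ holds
    have hne : ps ≠ [] := by
      intro h
      rw [h] at hn0
      simp at hn0
    have hB : pvLoopB ps mx m n n 0 1 0 = true := by
      obtain ⟨n', hn'⟩ : ∃ k, n = k + 1 := ⟨n - 1, by omega⟩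
      rw [hn']
      exact pvLoopB_true ps mx m _ n' 0 1 0 (by omega) (by omega) (Or.inl rfl)
    rw [hB]
    have hs10 : s1 = 0 := by
      by_contra h
      have := hspec1.2.2.1 0 (le_refl _) (by omega)
      omega
    rw [hs10]
    simp only [Nat.cast_zero]
    rw [pv_pyget_neg_one ps hn0]
    rcases lt_or_ge m 2 with hm2 | hm2
    · -- m = 1: A's second iteration pushes group to 2 > m
      obtain ⟨f, hf⟩ : ∃ f, (m + 1).toNat = f + 1 := ⟨(m + 1).toNat - 1, by omega⟩
      rw [hf]
      exact pvLoopA_true ps mx m _ f _ 0 (0 + 1) h0c (by omega)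
    · -- m ≥ 2 and not D_: some scanned prefix sum exceeds the wraparound pivot, so the
      -- wraparound jump stops short of count and A stalls there, returning True
      have hlast : ps.getD (ps.length - 1) 0 + mx < ps.getD (n - 1) 0 := by
        by_contra h
        have hcn : count.toNat = n := by omega
        exact hnd ⟨hne, hx0, hm2, by omega, by omega, by rw [hcn]; omega⟩
      set p1 := ps.getD (ps.length - 1) 0 + mx with hp1
      have hspec2 := pv_bisect_spec ps hs p1 ps.length 0 ps.length (by omega) (by omega) (le_refl _)
      set r := pvBisectRight ps p1 ps.length 0 ps.length with hr2
      have hrn : r < n := by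
        by_contra h
        have := hspec2.2.2.1 (n - 1) (by omega) (by omega)
        omega
      rcases Nat.eq_zero_or_pos r with hr0 | hr0
      · -- bisect returns 0 again: the wraparound state repeats
        apply pv_stall ps mx m (n : Int) p1 0 h0c (by rw [← hr2, hr0]) _ _ (0 + 1) (by omega)
        simp only [Nat.cast_zero]
        rw [pv_pyget_neg_one ps hn0, hp1]
      · -- bisect advances to r ≥ 1 < count, where A then stalls
        obtain ⟨f, hf⟩ : ∃ f, (m + 1).toNat = f + 1 := ⟨(m + 1).toNat - 1, by omega⟩
        rw [hf, pvLoopA_cont ps mx m _ f p1 0 (0 + 1) h0c (by omega), ← hr2]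
        have hpyr : (PySem.List.pyGet? ps ((r : Int) - 1)).getD 0 = ps.getD (r - 1) 0 :=
          pv_pyget_pos ps r (by omega) (by omega)
        rw [hpyr]
        have hrc : ((r : Nat) : Int) < (n : Int) := by exact_mod_cast hrn
        apply pv_stall ps mx m (n : Int) (ps.getD (r - 1) 0 + mx) r hrc _ (by rw [hpyr]) f
          (0 + 1 + 1) (by omega)
        -- the bisect from r returns r again: ps[r] > ps[r-1] + max_num
        have hpsr : ps.getD (r - 1) 0 + mx < ps.getD r 0 := by
          have h1 : p1 < ps.getD r 0 := hspec2.2.2.2 (by omega)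
          have h2 : ps.getD (r - 1) 0 ≤ ps.getD (ps.length - 1) 0 :=
            pv_sorted_getD hs (by omega) (by omega)
          omega
        have hspec3 := pv_bisect_spec ps hs (ps.getD (r - 1) 0 + mx) ps.length r ps.length
          (by omega) (by omega) (le_refl _)
        by_contra h
        have hgt : r < pvBisectRight ps (ps.getD (r - 1) 0 + mx) ps.length r ps.length := by
          rcases Nat.eq_or_lt_of_le hspec3.1 with h' | h'
          · omega
          · exact h'
        have := hspec3.2.2.1 r (le_refl _) hgt
        omega
  · -- prefix_sum[0] ≤ max_num: the first bisect lands at s1 ≥ 1, then the loops run in step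
    have hs1pos : 1 ≤ s1 := by
      by_contra h
      have h0 : s1 = 0 := by omega
      have := hspec1.2.2.2 (by omega : s1 < ps.length)
      rw [h0] at this
      omega
    rw [pv_pyget_pos ps s1 hs1pos hspec1.2.1]
    rcases lt_or_ge s1 n with hlt | hge
    · -- hand over to the main loop correspondence at the head of group 2
      have hwalk := pv_walk ps mx m n s1 n 0 s1 1 0 (by omega) (by omega) (by omega) (by omega)
        (fun t ht1 ht2 => by have := hspec1.2.2.1 t ht1 ht2; omega)
      rw [hwalk]
      exact pv_main ps mx m n hnl hs (m - (0 + 1)).toNat (0 + 1) s1 0 (m + 1).toNat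
        (n - s1) rfl hs1pos hlt hm
        (by have := hspec1.2.2.2 (by omega); omega) (by omega) (by omega)
    · -- the first group already covers all n scanned prefix sums: both sides give False
      rw [pvLoopA_exit ps mx m _ _ s1 (0 + 1) (by omega) _]
      have hwalk := pv_walk ps mx m n n n 0 n 1 0 (by omega) (by omega) (le_refl _) (by omega)
        (fun t ht1 ht2 => by have := hspec1.2.2.1 t ht1 (by omega); omega)
      rw [hwalk, pv_B_exit ps mx m n _ n 1 0 (le_refl _)]
      rw [decide_eq_false (fun h => by omega)]
  · -- count > len over a non-empty list: both programs answer True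
    unfold is_greater is_greater_alt
    rw [if_pos hlc]
    exact pv_A_over ps mx m count hlc _ mx 0 0 (by omega) (by omega)

theorem is_greater_changed : Claim_changed_is_greater := by
  unfold Claim_changed_is_greater; decide

theorem is_greater_tight : Claim_exact_is_greater := by
  intro ps mx m count _ hpre hd
  obtain ⟨hne, hx0, hm, hcpos, hcle, hlastle⟩ := hd
  rcases hpre with hc0 | ⟨hm0, _, _⟩ | ⟨hall, _, hcl⟩ | ⟨hs, hc1, hcl⟩ | ⟨hlc, _⟩
  · omega
  · omega
  · exfalso
    have hmem : ps.getD 0 0 ∈ ps := by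
      rw [List.getD_eq_getElem _ _ (by
        have : ps.length ≠ 0 := fun h => hne (List.eq_nil_of_length_eq_zero h)
        omega)]
      exact List.getElem_mem _
    have := hall _ hmem
    omega
  case inr.inr.inr.inr => omega
  set n := count.toNat with hnn
  have hcount : count = (n : Int) := by omega
  have hn1 : 1 ≤ n := by omega
  have hnl : n ≤ ps.length := by omega
  have hn0 : 0 < ps.length := by omega
  have h0c : ((0 : Nat) : Int) < (n : Int) := by omega
  -- B returns True at index 0
  have hB : is_greater_alt ps mx m count = true := by
    unfold is_greater_alt
    rw [if_neg (by omega : ¬ (ps.length : Int) < count)]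
    rw [hcount, Int.toNat_natCast]
    obtain ⟨n', hn'⟩ : ∃ k, n = k + 1 := ⟨n - 1, by omega⟩
    rw [hn']
    exact pvLoopB_true ps mx m _ n' 0 1 0 (by omega) (by omega) (Or.inl rfl)
  -- A returns False: the wraparound pivot prefix_sum[-1] + max_num covers the whole scanned range
  have hA : is_greater ps mx m count = false := by
    unfold is_greater
    rw [hcount]
    have hspec1 := pv_bisect_spec ps hs mx ps.length 0 ps.length (by omega) (by omega) (le_refl _)
    set s1 := pvBisectRight ps mx ps.length 0 ps.length with hs1
    have hs10 : s1 = 0 := by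
      by_contra h
      have := hspec1.2.2.1 0 (le_refl _) (by omega)
      omega
    rw [pvLoopA_cont ps mx m _ _ mx 0 0 h0c (by omega), ← hs1, hs10]
    simp only [Nat.cast_zero]
    rw [pv_pyget_neg_one ps hn0]
    set p1 := ps.getD (ps.length - 1) 0 + mx with hp1
    have hspec2 := pv_bisect_spec ps hs p1 ps.length 0 ps.length (by omega) (by omega) (le_refl _)
    set r := pvBisectRight ps p1 ps.length 0 ps.length with hr2
    have hrn : n ≤ r := by
      by_contra h
      have h1 := hspec2.2.2.2 (by omega : r < ps.length)
      have h2 : ps.getD r 0 ≤ ps.getD (n - 1) 0 := pv_sorted_getD hs (by omega) (by omega)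
      omega
    obtain ⟨f, hf⟩ : ∃ f, (m + 1).toNat = f + 1 := ⟨(m + 1).toNat - 1, by omega⟩
    rw [hf, pvLoopA_cont ps mx m _ f p1 0 (0 + 1) h0c (by omega), ← hr2]
    exact pvLoopA_exit ps mx m (n : Int) _ r (0 + 1 + 1) (by omega) f
  rw [hA, hB]
  simp
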